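-- pv_equiv track=rewrite | github.com/rf-iasys/OEIS | OEIS_A020714.py | A020714
-- ===== SOURCE A (Python) =====
-- def A020714(n):
--     marked = []
--     current = 1
--     k = 5
--
--     while len(marked) < n:
--         marked.append(k)
--         k += k + current//(3*k)
--         current += k
--
--     return marked
-- ===== SOURCE B (Python) =====
-- def A020714(n):
--     return [5 << i for i in range(n)]
-- ===== Notes on version B (the rewrite author's own statement) =====
-- stated objective: simpler
-- what changed: Replaced A's stateful recurrence (maintaining k and current, with a floor-division term that is always zero) by the closed form 5*2**i per index.
import Mathlib
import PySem

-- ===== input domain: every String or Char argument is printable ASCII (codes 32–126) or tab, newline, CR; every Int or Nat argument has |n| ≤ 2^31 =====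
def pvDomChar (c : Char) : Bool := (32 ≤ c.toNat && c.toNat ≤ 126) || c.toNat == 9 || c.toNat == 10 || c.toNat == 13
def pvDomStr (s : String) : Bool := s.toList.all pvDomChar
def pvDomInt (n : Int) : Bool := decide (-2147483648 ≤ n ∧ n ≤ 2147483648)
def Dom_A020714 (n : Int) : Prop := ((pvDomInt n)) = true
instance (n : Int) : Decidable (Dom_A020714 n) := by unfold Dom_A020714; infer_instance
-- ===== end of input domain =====

-- B replaces A's stateful recurrence with the closed form 5*2**i per index (simpler).

-- ===== PORT A =====
-- while len(marked) < n: each iteration appends exactly one element, so the loop runs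
-- exactly n.toNat times; the fuel is the number of remaining iterations.
def A020714_loop : Nat → List Int → Int → Int → List Int
  | 0, marked, _, _ => marked
  | f+1, marked, current, k =>
      let marked' := marked ++ [k]
      let k' := k + (k + PySem.Int.floordiv current (3*k))
      let current' := current + k'
      A020714_loop f marked' current' k'

def A020714 (n : Int) : List Int := A020714_loop n.toNat [] 1 5

-- ===== PORT B =====
-- Source B's `5 << i` (a left shift by a nonnegative range index) is exactly 5 * 2^i.
def A020714_alt (n : Int) : List Int :=
  (PySem.List.pyRange 0 n 1).map (fun i => 5 * 2 ^ i.toNat)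

-- ===== PRECONDITION & SPEC =====
def Spec_A020714 (n : Int) (out : List Int) : Prop := out = A020714_alt n
instance (n : Int) (out : List Int) : Decidable (Spec_A020714 n out) := by unfold Spec_A020714; infer_instance

-- ===== CLAIM (what is proved, stated in full; the proofs are below) =====
def Claim_equal_A020714 : Prop := ∀ (n : Int), Dom_A020714 n → Spec_A020714 n (A020714 n)

-- ===== LEMMAS AND PROOFS =====

-- Invariant: while 0 ≤ current < 3*k and 0 < k, the floor-division term is 0 and the
-- loop simply doubles k each step, producing marked ++ [k, 2k, 4k, …].
theorem A020714_loop_eq (f : Nat) : ∀ (marked : List Int) (current k : Int),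
    0 < k → 0 ≤ current → current < 3*k →
    A020714_loop f marked current k = marked ++ (List.range f).map (fun i => k * 2 ^ i) := by
  induction f with
  | zero => intro marked current k _ _ _; simp [A020714_loop]
  | succ f ih =>
    intro marked current k hk hc0 hc3
    have hdiv : PySem.Int.floordiv current (3*k) = 0 := by
      rw [PySem.Int.floordiv_eq_ediv_of_pos (by omega)]
      exact Int.ediv_eq_zero_of_lt hc0 hc3
    simp only [A020714_loop, hdiv]
    rw [ih (marked ++ [k]) (current + (k + (k + 0))) (k + (k + 0)) (by omega) (by omega) (by omega)]
    rw [List.range_succ_eq_map]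
    simp only [List.map_map, Function.comp, List.map_cons, pow_zero, mul_one]
    simp only [List.append_assoc, List.cons_append, List.nil_append]
    refine congrArg _ (congrArg _ (List.map_congr_left ?_))
    intro a _; simp [Function.comp, pow_succ]; ring

theorem A020714_eq_closed (n : Int) :
    A020714 n = (List.range n.toNat).map (fun i => 5 * 2 ^ i) := by
  unfold A020714
  rw [A020714_loop_eq n.toNat [] 1 5 (by norm_num) (by norm_num) (by norm_num)]
  simp

-- ===== VERDICT (by name: the statement is the Claim_ definition above) =====
theorem A020714_spec : Claim_equal_A020714 := by
  intro n _
  unfold Spec_A020714 A020714_alt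
  rw [A020714_eq_closed, PySem.List.pyRange_one]
  simp [List.map_map, Function.comp]
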